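-- pv_equiv track=rewrite | github.com/gridvisi/Python_workspace | 3 codewars/6 kyu/6 kyu English beggars.py | beggars
-- ===== SOURCE A (Python) =====
-- def beggars(values, n):
--     if n == 0:
--         return []
--     i=0
--     take=[]
--     for x in range(n):
--         take.append(0)
--     for val in values:
--         take[i%n]=take[i%n]+val
--         i= i + 1
--     return take
-- ===== SOURCE B (Python) =====
-- def beggars(values, n):
--     # Gather each beggar's total by scanning for the indices congruent to j mod n,
--     # instead of scattering values one at a time into a preallocated list.
--     return [sum(v for k, v in enumerate(values) if k % n == j) for j in range(n)]
-- ===== Notes on version B (the rewrite author's own statement) =====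
-- stated objective: alternative
-- what changed: A preallocates n zero buckets and scatters each value into bucket i%n in one pass; B gathers each bucket j directly as the sum of the values whose index is congruent to j mod n (one filtered sum per beggar), with no mutable bucket list and no counter.
import Mathlib
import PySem

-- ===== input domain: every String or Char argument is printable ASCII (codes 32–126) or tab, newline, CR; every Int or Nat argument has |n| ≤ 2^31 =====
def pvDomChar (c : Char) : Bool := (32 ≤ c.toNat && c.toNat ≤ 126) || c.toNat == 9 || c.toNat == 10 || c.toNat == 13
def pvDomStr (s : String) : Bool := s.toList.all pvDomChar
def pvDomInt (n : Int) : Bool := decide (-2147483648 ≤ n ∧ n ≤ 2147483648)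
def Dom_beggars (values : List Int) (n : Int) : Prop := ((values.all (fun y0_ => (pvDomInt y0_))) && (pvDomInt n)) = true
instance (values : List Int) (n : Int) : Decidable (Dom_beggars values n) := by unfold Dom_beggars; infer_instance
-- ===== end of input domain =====

-- B gathers each bucket j as one filtered sum over the indexed values instead of A's
-- scatter pass into a mutable bucket list; alternative decomposition, not claimed faster.

-- ===== PORT A =====
-- helper: Python 'take[i%n] = take[i%n] + val' — read-modify-write at index i%n
-- (exact for the in-range indices Pre_ guarantees; out of range it leaves the list
-- unchanged where Python raises, and Pre_ excludes those inputs)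
def setAdd : List Int → Int → Int → List Int
  | [], _, _ => []
  | x :: xs, i, v => if i = 0 then (x + v) :: xs else x :: setAdd xs (i - 1) v

def beggars (values : List Int) (n : Int) : List Int :=
  if n = 0 then []
  else
    let take := (PySem.List.pyRange 0 n 1).foldl (fun t _ => t ++ [(0 : Int)]) []
    (values.foldl (fun (s : List Int × Int) val =>
        (setAdd s.1 (PySem.Int.mod s.2 n) val, s.2 + 1)) (take, 0)).1

-- ===== PORT B =====
def beggars_alt (values : List Int) (n : Int) : List Int :=
  (PySem.List.pyRange 0 n 1).map (fun j =>
    ((PySem.List.enumerate values 0).filter (fun kv => PySem.Int.mod kv.1 n == j)).foldl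
      (fun s kv => s + kv.2) 0)

-- ===== PRECONDITION & SPEC =====
-- Pre_ excludes exactly the inputs where Python A raises IndexError: n < 0 with non-empty values.
def Pre_beggars (values : List Int) (n : Int) : Prop := 0 ≤ n ∨ values = []
instance (values : List Int) (n : Int) : Decidable (Pre_beggars values n) := by
  unfold Pre_beggars; infer_instance

def pvWitness_beggars : List Int × Int := ([3, 5, -2, 7], 2)

def Spec_beggars (values : List Int) (n : Int) (out : List Int) : Prop := out = beggars_alt values n
instance (values : List Int) (n : Int) (out : List Int) : Decidable (Spec_beggars values n out) := by
  unfold Spec_beggars; infer_instance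

-- ===== CLAIM (what is proved, stated in full; the proofs are below) =====
def Claim_equal_beggars : Prop := ∀ (values : List Int) (n : Int), Dom_beggars values n → Pre_beggars values n → Spec_beggars values n (beggars values n)

-- ===== LEMMAS AND PROOFS =====

-- bsum n j i vs = sum of the values of vs whose running counter (starting at i) is ≡ j (mod n)
def bsum (n j : Int) : Int → List Int → Int
  | _, [] => 0
  | i, v :: vs => (if PySem.Int.mod i n = j then v else 0) + bsum n j (i + 1) vs

theorem setAdd_getElem? (t : List Int) (i v : Int) (j : Nat) :
    (setAdd t i v)[j]? = t[j]?.map (fun x => if i = (j : Int) then x + v else x) := by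
  induction t generalizing i j with
  | nil => simp [setAdd]
  | cons x xs ih =>
    by_cases hi : i = 0
    · subst hi
      cases j with
      | zero => simp [setAdd]
      | succ k =>
        have h0 : ¬ ((0:Int) = (k : Int) + 1) := by omega
        simp [setAdd, h0]
    · cases j with
      | zero => simp [setAdd, hi]
      | succ k =>
        simp only [setAdd, if_neg hi, List.getElem?_cons_succ, ih]
        have : (i - 1 = (k : Int)) ↔ (i = ((k + 1 : Nat) : Int)) := by push_cast; omega
        simp [this]

theorem scat_getElem? (n : Int) (vs : List Int) : ∀ (t : List Int) (i : Int) (j : Nat),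
    ((vs.foldl (fun s val => (setAdd s.1 (PySem.Int.mod s.2 n) val, s.2 + 1)) (t, i)).1)[j]?
      = t[j]?.map (fun x => x + bsum n (j : Int) i vs) := by
  induction vs with
  | nil => intro t i j; simp [bsum]
  | cons v vs ih =>
    intro t i j
    simp only [List.foldl_cons]
    rw [ih, setAdd_getElem?]
    cases t[j]? with
    | none => rfl
    | some x =>
      simp only [Option.map_some, bsum]
      by_cases h : PySem.Int.mod i n = (j : Int) <;> simp [h] <;> ring

theorem foldl_append_zero (l : List Int) : ∀ (acc : List Int),
    l.foldl (fun t _ => t ++ [(0 : Int)]) acc = acc ++ List.replicate l.length 0 := by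
  induction l with
  | nil => intro acc; simp
  | cons x xs ih =>
    intro acc
    simp only [List.foldl_cons, ih, List.length_cons, List.replicate_succ]
    simp [List.append_assoc]

theorem filtersum_eq_bsum (n j : Int) (vs : List Int) : ∀ (c s0 : Int),
    ((PySem.List.enumerate vs c).filter (fun kv => PySem.Int.mod kv.1 n == j)).foldl
        (fun s kv => s + kv.2) s0 = s0 + bsum n j c vs := by
  induction vs with
  | nil => intro c s0; simp [PySem.List.enumerate_nil, bsum]
  | cons v vs ih =>
    intro c s0
    rw [PySem.List.enumerate_cons, List.filter_cons]
    by_cases h : PySem.Int.mod c n = j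
    · rw [if_pos (by simpa using h), List.foldl_cons, ih]
      simp only [bsum, if_pos h]
      ring
    · rw [if_neg (by simpa using h), ih]
      simp only [bsum, if_neg h]
      ring

theorem beggars_eq (values : List Int) (n : Int) :
    beggars values n = beggars_alt values n := by
  by_cases hn : n = 0
  · subst hn
    simp [beggars, beggars_alt, PySem.List.pyRange_one_eq_nil (by omega : (0:Int) ≤ 0)]
  · apply List.ext_getElem?
    intro j
    simp only [beggars, beggars_alt, if_neg hn]
    rw [scat_getElem?, foldl_append_zero]
    simp only [List.nil_append, List.getElem?_replicate, PySem.List.length_pyRange_one]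
    rw [List.getElem?_map]
    by_cases hj : j < (n - 0).toNat
    · have h1 : (PySem.List.pyRange 0 n 1)[j]? = some ((0 : Int) + (j : Int)) := by
        rw [List.getElem?_eq_getElem (by simpa [PySem.List.length_pyRange_one] using hj)]
        rw [PySem.List.getElem_pyRange_one]
      rw [h1]
      simp only [if_pos hj, Option.map_some, zero_add]
      rw [filtersum_eq_bsum]
      simp
    · have h1 : (PySem.List.pyRange 0 n 1)[j]? = none := by
        rw [List.getElem?_eq_none]
        simpa [PySem.List.length_pyRange_one] using hj
      rw [h1]
      rw [if_neg hj]
      simp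

-- ===== VERDICT (by name: the statement is the Claim_ definition above) =====
theorem beggars_spec : Claim_equal_beggars := by
  intro values n _ _
  unfold Spec_beggars
  exact beggars_eq values n
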